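-- pv_equiv track=rewrite | github.com/glaucomori/Python_exercises | practice_002.py | missingLetters
-- ===== SOURCE A (Python) =====
-- def missingLetters(word1, word2):
--     basisWord = list(word1) # transformada em lista para pode interagir com cada caractere como um item de uma lista
--     objectiveWord = list(word2) # transformada em lista para pode interagir com cada caractere como um item de uma lista
--
--     #  se a primeira letra da palavra1 for igual da palavra 2 eu removo cada uma de sua respectiva lista
--     #  se a primeira letra da plavra1 for diferente da palavra 2 eu removo apenas a primeira letra da palavra1
--     #  quando as letras da palavra1 acabarem eu conto quantas letras tem na palavra2
--
--     while len(basisWord) != 0: # criando uma condição para fazer a comparação enquanto a palavra1 ainda tiver caracteres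
--         if basisWord[0] == objectiveWord[0]: # comparando os primeiros caracteres de cada variável
--             basisWord = basisWord[1:] # se a condição existir a palavra1 perde o primeiro caractere
--             objectiveWord = objectiveWord[1:] # se a condição existir a palavra2 perde o primeiro caractere
--         else: # o que faze caso a comparação não se prove verdadeira
--             basisWord = basisWord[1:] # se a condição existir a palavra1 perde o primeiro caractere
--
--     return len(objectiveWord)
-- ===== SOURCE B (Python) =====
-- def missingLetters(word1, word2):
--     j = 0
--     for c in word1:
--         if j < len(word2) and c == word2[j]:
--             j += 1
--     return len(word2) - j
-- ===== Notes on version B (the rewrite author's own statement) =====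
-- stated objective: faster
-- what changed: replaces the while-loop that rebuilds both lists by slicing on every step with a single pass over word1 keeping only a match index into word2
import Mathlib
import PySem

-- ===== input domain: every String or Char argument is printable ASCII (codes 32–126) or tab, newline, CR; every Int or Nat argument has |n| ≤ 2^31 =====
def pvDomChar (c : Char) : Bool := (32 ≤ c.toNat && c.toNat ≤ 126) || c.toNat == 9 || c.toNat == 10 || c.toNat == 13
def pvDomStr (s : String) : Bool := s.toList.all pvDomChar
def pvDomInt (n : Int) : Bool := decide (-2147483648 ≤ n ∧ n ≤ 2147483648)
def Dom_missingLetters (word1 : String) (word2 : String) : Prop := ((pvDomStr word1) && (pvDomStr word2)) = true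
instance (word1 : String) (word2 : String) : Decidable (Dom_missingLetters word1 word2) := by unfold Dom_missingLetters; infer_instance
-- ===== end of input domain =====

-- B replaces A's quadratic slice-and-rescan while-loop by a single pass over word1
-- tracking a match index into word2 (faster, asymptotic).


-- ===== PORT A =====
-- A's while-loop over (basisWord, objectiveWord); each branch drops the head(s) as the slicing does.
def missingLettersLoop : List Char → List Char → Int
  | [], obj => (obj.length : Int)
  | _ :: _, [] => 0   -- Python raises IndexError here (objectiveWord[0] on empty list); excluded by Pre_
  | b :: bs, o :: os => if b = o then missingLettersLoop bs os else missingLettersLoop bs (o :: os)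

def missingLetters (word1 : String) (word2 : String) : Int :=
  missingLettersLoop word1.toList word2.toList

-- ===== PORT B =====
-- single pass: fold over word1 advancing a match index j into word2; t[j]? = some c
-- is exactly Python's "j < len(word2) and c == word2[j]".
def missingLetters_alt (word1 : String) (word2 : String) : Int :=
  let t := word2.toList
  let j := word1.toList.foldl (fun (j : Nat) c => if t[j]? = some c then j + 1 else j) 0
  (t.length : Int) - (j : Int)

-- ===== PRECONDITION & SPEC =====
-- Pre_ excludes exactly the inputs where A raises IndexError: word2 exhausted (matched as a
-- subsequence of word1 with its last character still unread) while the loop keeps going.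
def Pre_missingLetters (word1 : String) (word2 : String) : Prop :=
  ¬ (word1 ≠ "" ∧ word2.toList.Sublist word1.toList.dropLast)
instance (word1 : String) (word2 : String) : Decidable (Pre_missingLetters word1 word2) := by unfold Pre_missingLetters; infer_instance

def pvWitness_missingLetters : String × String := ("abc", "bx")

def Spec_missingLetters (word1 : String) (word2 : String) (out : Int) : Prop := out = missingLetters_alt word1 word2
instance (word1 : String) (word2 : String) (out : Int) : Decidable (Spec_missingLetters word1 word2 out) := by unfold Spec_missingLetters; infer_instance

-- ===== CLAIM (what is proved, stated in full; the proofs are below) =====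
def Claim_equal_missingLetters : Prop := ∀ (word1 : String) (word2 : String), Dom_missingLetters word1 word2 → Pre_missingLetters word1 word2 → Spec_missingLetters word1 word2 (missingLetters word1 word2)


-- ===== LEMMAS AND PROOFS =====

-- the number of characters of obj that A's loop matches greedily against basis
def pvGreedy : List Char → List Char → Nat
  | [], _ => 0
  | _ :: _, [] => 0
  | b :: bs, o :: os => if b = o then 1 + pvGreedy bs os else pvGreedy bs (o :: os)

-- A's loop returns len(obj) minus the number of greedily matched characters (holds on all inputs
-- of the port, the IndexError branch included).
theorem missingLettersLoop_eq (basis obj : List Char) :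
    missingLettersLoop basis obj = (obj.length : Int) - (pvGreedy basis obj : Int) := by
  induction basis generalizing obj with
  | nil => simp [missingLettersLoop, pvGreedy]
  | cons b bs ih =>
    cases obj with
    | nil => simp [missingLettersLoop, pvGreedy]
    | cons o os =>
      by_cases h : b = o
      · simp [missingLettersLoop, pvGreedy, h, ih]; omega
      · simp [missingLettersLoop, pvGreedy, h, ih]

theorem pvGreedy_nil (bs : List Char) : pvGreedy bs [] = 0 := by
  cases bs <;> simp [pvGreedy]

-- B's fold starting at index j advances by exactly the greedy match count against t.drop j
theorem foldl_eq_greedy (t : List Char) (basis : List Char) (j : Nat) :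
    basis.foldl (fun (j : Nat) c => if t[j]? = some c then j + 1 else j) j
      = j + pvGreedy basis (t.drop j) := by
  induction basis generalizing j with
  | nil => simp [pvGreedy]
  | cons b bs ih =>
    cases h : t[j]? with
    | none =>
      have hlen : t.length ≤ j := by
        by_contra hc
        exact absurd h (by simp [List.getElem?_eq_getElem (by omega : j < t.length)])
      have hdrop : t.drop j = [] := List.drop_eq_nil_of_le hlen
      have hdrop' : t.drop (j + 1) = [] := List.drop_eq_nil_of_le (by omega)
      simp [List.foldl_cons, h, hdrop, ih, pvGreedy_nil]
    | some c =>
      have hj : j < t.length := (List.getElem?_eq_some_iff.mp h).1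
      have hdrop : t.drop j = c :: t.drop (j + 1) := by
        rw [List.drop_eq_getElem_cons hj]
        simp [(List.getElem?_eq_some_iff.mp h).2]
      by_cases hb : c = b
      · simp [List.foldl_cons, h, hb, ih, hdrop, pvGreedy]
        omega
      · have hb' : ¬ b = c := fun e => hb e.symm
        simp [List.foldl_cons, h, hb, ih, hdrop, pvGreedy, hb']

-- ===== VERDICT (by name: the statement is the Claim_ definition above) =====
theorem missingLetters_spec : Claim_equal_missingLetters := by
  intro word1 word2 _ _
  unfold Spec_missingLetters missingLetters missingLetters_alt
  simp only [missingLettersLoop_eq, foldl_eq_greedy, List.drop_zero, Nat.zero_add]
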